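-- pv_equiv track=rewrite | github.com/iannsgirdye/yandex_algorithms | 4.3/D.py | SlowMultiply
-- ===== SOURCE A (Python) =====
-- MIN_A = -2 * 10 ** 4
--
-- def SlowMultiply(n: int, a: list) -> int:
--     result = -2 * MIN_A ** 4
--     for i in range(n):
--         for j in range(i + 1, n):
--             for k in range(j + 1, n):
--                 for l in range(k + 1, n):
--                     current_result = a[i] * a[j] * a[k] * a[l]
--                     if current_result > result:
--                         result = current_result
--     return result
-- ===== SOURCE B (Python) =====
-- MIN_A = -2 * 10 ** 4
--
-- def _upd(hi, lo, hip, lop, x):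
--     cands = [] if hi is None else [hi, lo]
--     if hip is not None:
--         cands += [x * hip, x * lop]
--     if not cands:
--         return None, None
--     return max(cands), min(cands)
--
-- def SlowMultiply(n: int, a: list) -> int:
--     hi1 = lo1 = hi2 = lo2 = hi3 = lo3 = hi4 = lo4 = None
--     for i in range(n):
--         x = a[i]
--         hi4, lo4 = _upd(hi4, lo4, hi3, lo3, x)
--         hi3, lo3 = _upd(hi3, lo3, hi2, lo2, x)
--         hi2, lo2 = _upd(hi2, lo2, hi1, lo1, x)
--         hi1, lo1 = _upd(hi1, lo1, 1, 1, x)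
--     result = -2 * MIN_A ** 4
--     if hi4 is not None and hi4 > result:
--         result = hi4
--     return result
-- ===== Notes on version B (the rewrite author's own statement) =====
-- stated objective: faster
-- what changed: Replaced the O(n^4) scan over all index quadruples by a single pass that maintains, for each subset size 1..4, the maximum and minimum product of that many distinct elements seen so far (None until enough elements), returning the clamped size-4 maximum.
-- outside the precondition, e.g. on SlowMultiply(2, []): A returns -320000000000000000, B raises IndexError; on SlowMultiply(3, [5]): A returns -320000000000000000, B raises IndexError
import Mathlib
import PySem

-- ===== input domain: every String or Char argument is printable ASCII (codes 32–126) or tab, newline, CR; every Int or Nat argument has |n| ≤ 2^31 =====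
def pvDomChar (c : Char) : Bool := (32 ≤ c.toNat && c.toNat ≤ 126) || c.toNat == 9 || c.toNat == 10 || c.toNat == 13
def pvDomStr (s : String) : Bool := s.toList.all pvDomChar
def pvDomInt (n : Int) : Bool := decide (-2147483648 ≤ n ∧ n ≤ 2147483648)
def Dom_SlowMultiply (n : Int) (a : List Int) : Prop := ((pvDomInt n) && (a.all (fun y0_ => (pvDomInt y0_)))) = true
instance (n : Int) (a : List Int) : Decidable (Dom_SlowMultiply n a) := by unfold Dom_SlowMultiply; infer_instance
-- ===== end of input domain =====

-- B replaces A's O(n^4) scan of all index quadruples by one O(n) pass keeping max/min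
-- products of 1..4 distinct elements seen so far (objective: faster).

def MIN_A : Int := -2 * 10 ^ 4

-- ===== PORT A =====
def SlowMultiply (n : Int) (a : List Int) : Int :=
  (PySem.List.pyRange 0 n 1).foldl (fun result i =>
    (PySem.List.pyRange (i + 1) n 1).foldl (fun result j =>
      (PySem.List.pyRange (j + 1) n 1).foldl (fun result k =>
        (PySem.List.pyRange (k + 1) n 1).foldl (fun result l =>
          let current := PySem.List.pyGetD a i 0 * PySem.List.pyGetD a j 0 *
            PySem.List.pyGetD a k 0 * PySem.List.pyGetD a l 0
          if current > result then current else result) result) result) result)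
    (-2 * MIN_A ^ 4)

-- ===== PORT B =====
structure PVState where
  h1 : Option Int
  l1 : Option Int
  h2 : Option Int
  l2 : Option Int
  h3 : Option Int
  l3 : Option Int
  h4 : Option Int
  l4 : Option Int
deriving Repr, DecidableEq

-- Python helper _upd: candidate list, then (max, min); (None, None) when no candidates
def pvUpd (hi lo hip lop : Option Int) (x : Int) : Option Int × Option Int :=
  let cands :=
    (match hi, lo with
     | some h, some l => [h, l]
     | _, _ => []) ++
    (match hip, lop with
     | some hp, some lp => [x * hp, x * lp]
     | _, _ => [])
  (cands.max?, cands.min?)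

def pvStep (s : PVState) (x : Int) : PVState :=
  let p4 := pvUpd s.h4 s.l4 s.h3 s.l3 x
  let p3 := pvUpd s.h3 s.l3 s.h2 s.l2 x
  let p2 := pvUpd s.h2 s.l2 s.h1 s.l1 x
  let p1 := pvUpd s.h1 s.l1 (some 1) (some 1) x
  ⟨p1.1, p1.2, p2.1, p2.2, p3.1, p3.2, p4.1, p4.2⟩

def SlowMultiply_alt (n : Int) (a : List Int) : Int :=
  let st := (PySem.List.pyRange 0 n 1).foldl
    (fun s i => pvStep s (PySem.List.pyGetD a i 0))
    ⟨none, none, none, none, none, none, none, none⟩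
  let result := -2 * MIN_A ^ 4
  match st.h4 with
  | some v => if v > result then v else result
  | none => result

-- ===== PRECONDITION & SPEC =====
-- Pre_ excludes n > len(a): there A raises IndexError whenever n ≥ 4, while for n < 4 A
-- returns the sentinel without ever touching the list and B's natural index loop raises.
def Pre_SlowMultiply (n : Int) (a : List Int) : Prop := n ≤ (a.length : Int)
instance (n : Int) (a : List Int) : Decidable (Pre_SlowMultiply n a) := by
  unfold Pre_SlowMultiply; infer_instance

def pvWitness_SlowMultiply : Int × List Int := (4, [1, -2, 3, -4])

def Spec_SlowMultiply (n : Int) (a : List Int) (out : Int) : Prop := out = SlowMultiply_alt n a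
instance (n : Int) (a : List Int) (out : Int) : Decidable (Spec_SlowMultiply n a out) := by
  unfold Spec_SlowMultiply; infer_instance

-- ===== CLAIM (what is proved, stated in full; the proofs are below) =====
def Claim_equal_SlowMultiply : Prop := ∀ (n : Int) (a : List Int),
  Dom_SlowMultiply n a → Pre_SlowMultiply n a → Spec_SlowMultiply n a (SlowMultiply n a)

-- ===== LEMMAS AND PROOFS =====

-- products of the length-k sublists
def pvS (k : Nat) (t : List Int) : List Int := (t.sublistsLen k).map List.prod

-- generic "for each suffix position" list builder (A's loop shape)
def pvSuff (g : Int → List Int → List Int) : List Int → List Int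
  | [] => []
  | x :: t => g x t ++ pvSuff g t

def pvP1 (c : Int) (t : List Int) : List Int := t.map (c * ·)
def pvP2 (c : Int) (t : List Int) : List Int := pvSuff (fun x t' => pvP1 (c * x) t') t
def pvP3 (c : Int) (t : List Int) : List Int := pvSuff (fun x t' => pvP2 (c * x) t') t
def pvP4 (t : List Int) : List Int := pvSuff (fun x t' => pvP3 x t') t

def pvStFor (P : List Int) : PVState :=
  ⟨(pvS 1 P).max?, (pvS 1 P).min?, (pvS 2 P).max?, (pvS 2 P).min?,
   (pvS 3 P).max?, (pvS 3 P).min?, (pvS 4 P).max?, (pvS 4 P).min?⟩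

def pvFinish (o : Option Int) : Int :=
  match o with
  | some v => if v > (-2 * MIN_A ^ 4) then v else (-2 * MIN_A ^ 4)
  | none => (-2 * MIN_A ^ 4)

theorem pv_if_max (r c : Int) : (if c > r then c else r) = max r c := by
  simp only [gt_iff_lt, max_def]
  split_ifs <;> omega

theorem pv_foldl_max_comm (l : List Int) : ∀ (r a : Int),
    List.foldl max (max r a) l = max r (List.foldl max a l) := by
  induction l with
  | nil => intro r a; rfl
  | cons x t ih => intro r a; simp only [List.foldl_cons, max_assoc, ih]

theorem pv_foldl_max_eq (l : List Int) (r : Int) :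
    List.foldl max r l = match l.max? with | none => r | some v => max r v := by
  cases l with
  | nil => rfl
  | cons a t => simp only [List.max?_cons', List.foldl_cons, pv_foldl_max_comm]

theorem pv_max?_congr_mem (l1 l2 : List Int) (h : ∀ x, x ∈ l1 ↔ x ∈ l2) :
    l1.max? = l2.max? := by
  cases h1 : l1.max? with
  | none =>
      rw [List.max?_eq_none_iff] at h1
      subst h1
      cases h2 : l2.max? with
      | none => rfl
      | some v =>
          rw [List.max?_eq_some_iff] at h2
          exact absurd ((h v).mpr h2.1) (by simp)
  | some v =>
      rw [List.max?_eq_some_iff] at h1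
      symm
      rw [List.max?_eq_some_iff]
      exact ⟨(h v).mp h1.1, fun b hb => h1.2 b ((h b).mpr hb)⟩

theorem pv_max?_append (l1 l2 : List Int) (M1 M2 : Int)
    (h1 : l1.max? = some M1) (h2 : l2.max? = some M2) :
    (l1 ++ l2).max? = some (max M1 M2) := by
  rw [List.max?_eq_some_iff] at h1 h2 ⊢
  constructor
  · rcases max_choice M1 M2 with h | h <;> rw [h]
    · exact List.mem_append_left _ h1.1
    · exact List.mem_append_right _ h2.1
  · intro b hb
    rcases List.mem_append.mp hb with hb | hb
    · exact le_trans (h1.2 b hb) (le_max_left _ _)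
    · exact le_trans (h2.2 b hb) (le_max_right _ _)

theorem pv_min?_append (l1 l2 : List Int) (M1 M2 : Int)
    (h1 : l1.min? = some M1) (h2 : l2.min? = some M2) :
    (l1 ++ l2).min? = some (min M1 M2) := by
  rw [List.min?_eq_some_iff] at h1 h2 ⊢
  constructor
  · rcases min_choice M1 M2 with h | h <;> rw [h]
    · exact List.mem_append_left _ h1.1
    · exact List.mem_append_right _ h2.1
  · intro b hb
    rcases List.mem_append.mp hb with hb | hb
    · exact le_trans (min_le_left _ _) (h1.2 b hb)
    · exact le_trans (min_le_right _ _) (h2.2 b hb)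

theorem pv_map_mul_max? (l : List Int) (x M m : Int)
    (hM : l.max? = some M) (hm : l.min? = some m) :
    (l.map (x * ·)).max? = some (max (x * M) (x * m)) := by
  rw [List.max?_eq_some_iff] at hM ⊢
  rw [List.min?_eq_some_iff] at hm
  constructor
  · rcases max_choice (x * M) (x * m) with h | h <;> rw [h]
    · exact List.mem_map_of_mem hM.1
    · exact List.mem_map_of_mem hm.1
  · intro b hb
    rcases List.mem_map.mp hb with ⟨p, hp, rfl⟩
    rcases le_total 0 x with hx | hx
    · exact le_trans (mul_le_mul_of_nonneg_left (hM.2 p hp) hx) (le_max_left _ _)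
    · exact le_trans (mul_le_mul_of_nonpos_left (hm.2 p hp) hx) (le_max_right _ _)

theorem pv_map_mul_min? (l : List Int) (x M m : Int)
    (hM : l.max? = some M) (hm : l.min? = some m) :
    (l.map (x * ·)).min? = some (min (x * M) (x * m)) := by
  rw [List.max?_eq_some_iff] at hM
  rw [List.min?_eq_some_iff] at hm ⊢
  constructor
  · rcases min_choice (x * M) (x * m) with h | h <;> rw [h]
    · exact List.mem_map_of_mem hM.1
    · exact List.mem_map_of_mem hm.1
  · intro b hb
    rcases List.mem_map.mp hb with ⟨p, hp, rfl⟩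
    rcases le_total 0 x with hx | hx
    · exact le_trans (min_le_right _ _) (mul_le_mul_of_nonneg_left (hm.2 p hp) hx)
    · exact le_trans (min_le_left _ _) (mul_le_mul_of_nonpos_left (hM.2 p hp) hx)

theorem pvS_succ_cons (k : Nat) (x : Int) (P : List Int) :
    pvS (k + 1) (x :: P) = pvS (k + 1) P ++ (pvS k P).map (x * ·) := by
  unfold pvS
  rw [List.sublistsLen_succ_cons, List.map_append]
  congr 1
  simp [List.map_map, Function.comp_def, List.prod_cons]

theorem pvS_nonempty_of (k : Nat) (P : List Int) (h : pvS (k + 1) P ≠ []) :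
    pvS k P ≠ [] := by
  unfold pvS at h ⊢
  intro hc
  apply h
  rw [List.map_eq_nil_iff] at hc ⊢
  have h1 := List.length_sublistsLen k P
  rw [hc] at h1
  simp only [List.length_nil] at h1
  have hlt : P.length < k := Nat.choose_eq_zero_iff.mp h1.symm
  have h2 := List.length_sublistsLen (k + 1) P
  rw [Nat.choose_eq_zero_iff.mpr (by omega)] at h2
  exact List.length_eq_zero_iff.mp h2

theorem pv_updCorrect (k : Nat) (P : List Int) (x : Int) :
    pvUpd ((pvS (k + 1) P).max?) ((pvS (k + 1) P).min?) ((pvS k P).max?) ((pvS k P).min?) x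
      = ((pvS (k + 1) (x :: P)).max?, (pvS (k + 1) (x :: P)).min?) := by
  rw [pvS_succ_cons]
  by_cases hk : pvS k P = []
  · have hk1 : pvS (k + 1) P = [] := by
      by_contra hcon; exact (pvS_nonempty_of k P hcon) hk
    rw [hk, hk1]
    rfl
  · obtain ⟨M2, hM2⟩ : ∃ v, (pvS k P).max? = some v := by
      cases h : (pvS k P).max? with
      | none => exact absurd (List.max?_eq_none_iff.mp h) hk
      | some v => exact ⟨v, rfl⟩
    obtain ⟨m2, hm2⟩ : ∃ v, (pvS k P).min? = some v := by
      cases h : (pvS k P).min? with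
      | none => exact absurd (List.min?_eq_none_iff.mp h) hk
      | some v => exact ⟨v, rfl⟩
    by_cases hk1 : pvS (k + 1) P = []
    · rw [hk1, List.nil_append, hM2, hm2,
        pv_map_mul_max? (pvS k P) x M2 m2 hM2 hm2, pv_map_mul_min? (pvS k P) x M2 m2 hM2 hm2]
      simp [pvUpd]
    · obtain ⟨M1, hM1⟩ : ∃ v, (pvS (k + 1) P).max? = some v := by
        cases h : (pvS (k + 1) P).max? with
        | none => exact absurd (List.max?_eq_none_iff.mp h) hk1
        | some v => exact ⟨v, rfl⟩
      obtain ⟨m1, hm1⟩ : ∃ v, (pvS (k + 1) P).min? = some v := by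
        cases h : (pvS (k + 1) P).min? with
        | none => exact absurd (List.min?_eq_none_iff.mp h) hk1
        | some v => exact ⟨v, rfl⟩
      have hle1 : m1 ≤ M1 :=
        (List.min?_eq_some_iff.mp hm1).2 M1 (List.max?_eq_some_iff.mp hM1).1
      rw [hM1, hm1, hM2, hm2,
        pv_max?_append _ _ _ _ hM1 (pv_map_mul_max? (pvS k P) x M2 m2 hM2 hm2),
        pv_min?_append _ _ _ _ hm1 (pv_map_mul_min? (pvS k P) x M2 m2 hM2 hm2)]
      simp only [pvUpd, List.cons_append, List.nil_append, List.max?_cons', List.min?_cons',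
        List.foldl_cons, List.foldl_nil, Prod.mk.injEq, Option.some.injEq]
      omega

theorem pvStep_correct (P : List Int) (x : Int) :
    pvStep (pvStFor P) x = pvStFor (x :: P) := by
  have h0M : (pvS 0 P).max? = some 1 := by simp [pvS]
  have h0m : (pvS 0 P).min? = some 1 := by simp [pvS]
  have e1 := pv_updCorrect 0 P x
  rw [h0M, h0m] at e1
  have e2 : pvUpd ((pvS 2 P).max?) ((pvS 2 P).min?) ((pvS 1 P).max?) ((pvS 1 P).min?) x
      = ((pvS 2 (x :: P)).max?, (pvS 2 (x :: P)).min?) := pv_updCorrect 1 P x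
  have e3 : pvUpd ((pvS 3 P).max?) ((pvS 3 P).min?) ((pvS 2 P).max?) ((pvS 2 P).min?) x
      = ((pvS 3 (x :: P)).max?, (pvS 3 (x :: P)).min?) := pv_updCorrect 2 P x
  have e4 : pvUpd ((pvS 4 P).max?) ((pvS 4 P).min?) ((pvS 3 P).max?) ((pvS 3 P).min?) x
      = ((pvS 4 (x :: P)).max?, (pvS 4 (x :: P)).min?) := pv_updCorrect 3 P x
  simp only [pvStep, pvStFor, e1, e2, e3, e4]

theorem pv_foldl_step (l : List Int) : ∀ (P : List Int),
    l.foldl pvStep (pvStFor P) = pvStFor (l.reverse ++ P) := by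
  induction l with
  | nil => intro P; simp
  | cons x t ih =>
      intro P
      simp only [List.foldl_cons, pvStep_correct, ih, List.reverse_cons, List.append_assoc,
        List.singleton_append]

-- membership characterisations
theorem pv_mem_p1 (c : Int) (t : List Int) (x : Int) :
    x ∈ pvP1 c t ↔ ∃ s ∈ t.sublistsLen 1, x = c * s.prod := by
  unfold pvP1
  simp only [List.mem_map]
  constructor
  · rintro ⟨y, hy, rfl⟩
    exact ⟨[y], List.mem_sublistsLen.mpr ⟨List.singleton_sublist.mpr hy, rfl⟩, by simp⟩
  · rintro ⟨s, hs, rfl⟩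
    rcases List.mem_sublistsLen.mp hs with ⟨hsub, hlen⟩
    rcases List.length_eq_one_iff.mp hlen with ⟨y, rfl⟩
    exact ⟨y, List.singleton_sublist.mp hsub, by simp⟩

theorem pv_mem_suff (pk : Int → List Int → List Int) (k : Nat)
    (hp : ∀ c t x, x ∈ pk c t ↔ ∃ s ∈ t.sublistsLen k, x = c * s.prod) :
    ∀ (c : Int) (t : List Int) (x : Int),
      x ∈ pvSuff (fun y t' => pk (c * y) t') t ↔ ∃ s ∈ t.sublistsLen (k + 1), x = c * s.prod := by
  intro c t
  induction t with
  | nil => intro x; simp [pvSuff]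
  | cons y t' ih =>
      intro x
      rw [pvSuff]
      simp only [List.mem_append, hp, ih, List.sublistsLen_succ_cons, List.mem_map]
      constructor
      · rintro (⟨s, hs, rfl⟩ | ⟨s, hs, rfl⟩)
        · exact ⟨y :: s, Or.inr ⟨s, hs, rfl⟩, by rw [List.prod_cons]; ring⟩
        · exact ⟨s, Or.inl hs, rfl⟩
      · rintro ⟨s, hs | ⟨u, hu, rfl⟩, rfl⟩
        · exact Or.inr ⟨s, hs, rfl⟩
        · exact Or.inl ⟨u, hu, by rw [List.prod_cons]; ring⟩

theorem pv_mem_p2 (c : Int) (t : List Int) (x : Int) :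
    x ∈ pvP2 c t ↔ ∃ s ∈ t.sublistsLen 2, x = c * s.prod :=
  pv_mem_suff pvP1 1 pv_mem_p1 c t x

theorem pv_mem_p3 (c : Int) (t : List Int) (x : Int) :
    x ∈ pvP3 c t ↔ ∃ s ∈ t.sublistsLen 3, x = c * s.prod :=
  pv_mem_suff pvP2 2 pv_mem_p2 c t x

theorem pv_mem_p4 (t : List Int) (x : Int) :
    x ∈ pvP4 t ↔ ∃ s ∈ t.sublistsLen 4, x = s.prod := by
  have h : pvP4 t = pvSuff (fun y t' => pvP3 (1 * y) t') t := by
    unfold pvP4; congr 1; funext y t'; rw [one_mul]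
  rw [h, pv_mem_suff pvP3 3 pv_mem_p3 1 t x]
  simp

-- A's nested loops over a suffix, one level at a time
theorem pv_level (L : List Int) (g : Int → List Int → List Int) :
    ∀ (d : Nat) (s r : Int), 0 ≤ s → (L.length : Int) - s ≤ (d : Int) →
      List.foldl (fun r k => List.foldl max r (g (PySem.List.pyGetD L k 0) (L.drop (k + 1).toNat)))
          r (PySem.List.pyRange s (L.length : Int) 1)
        = List.foldl max r (pvSuff g (L.drop s.toNat)) := by
  intro d
  induction d with
  | zero =>
      intro s r hs hd
      rw [PySem.List.pyRange_one_eq_nil (by omega),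
        List.drop_eq_nil_of_le (by omega : L.length ≤ s.toNat)]
      rfl
  | succ d ih =>
      intro s r hs hd
      by_cases hle : (L.length : Int) ≤ s
      · rw [PySem.List.pyRange_one_eq_nil hle,
          List.drop_eq_nil_of_le (by omega : L.length ≤ s.toNat)]
        rfl
      · have hlt : s < (L.length : Int) := by omega
        have hsn : s.toNat < L.length := by omega
        rw [PySem.List.pyRange_one_cons hlt, List.foldl_cons,
          List.drop_eq_getElem_cons hsn, pvSuff, List.foldl_append,
          PySem.List.pyGetD_eq_getElem L 0 hs hlt]
        have h1 : (s + 1).toNat = s.toNat + 1 := by omega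
        refine Eq.trans (ih (s + 1) _ (by omega) (by push_cast at hd ⊢; omega)) ?_
        rw [h1]

theorem pv_get_take (a : List Int) (nn : Nat) : ∀ (i : Int), 0 ≤ i →
    i < ((a.take nn).length : Int) →
    PySem.List.pyGetD a i 0 = PySem.List.pyGetD (a.take nn) i 0 := by
  intro i h0 h1
  have hlen : (a.take nn).length ≤ a.length := by
    rw [List.length_take]; omega
  rw [PySem.List.pyGetD_eq_getElem a 0 h0 (by omega),
    PySem.List.pyGetD_eq_getElem (a.take nn) 0 h0 h1, List.getElem_take]

theorem pv_step_l (a L : List Int)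
    (hsub : ∀ (i : Int), 0 ≤ i → i < (L.length : Int) →
      PySem.List.pyGetD a i 0 = PySem.List.pyGetD L i 0)
    (i j k : Int) (hi : 0 ≤ i) (hij : i < j) (hjk : j < k) (hk : k < (L.length : Int)) (r : Int) :
    (PySem.List.pyRange (k + 1) (L.length : Int) 1).foldl (fun result l =>
        let current := PySem.List.pyGetD a i 0 * PySem.List.pyGetD a j 0 *
          PySem.List.pyGetD a k 0 * PySem.List.pyGetD a l 0
        if current > result then current else result) r
      = List.foldl max r (pvP1 (PySem.List.pyGetD L i 0 * PySem.List.pyGetD L j 0 *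
          PySem.List.pyGetD L k 0) (L.drop (k + 1).toNat)) := by
  refine Eq.trans (PySem.List.foldl_congr_mem _ _
    (fun result l => max result (PySem.List.pyGetD L i 0 * PySem.List.pyGetD L j 0 *
      PySem.List.pyGetD L k 0 * PySem.List.pyGetD L l 0)) r ?_) ?_
  · intro acc l hl
    rcases PySem.List.mem_pyRange_one.mp hl with ⟨hl1, hl2⟩
    rw [hsub i hi (by omega), hsub j (by omega) (by omega), hsub k (by omega) hk,
      hsub l (by omega) hl2]
    exact pv_if_max acc _
  · refine Eq.trans (PySem.List.foldl_pyRange_pyGetD' L 0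
      (fun acc v => max acc (PySem.List.pyGetD L i 0 * PySem.List.pyGetD L j 0 *
        PySem.List.pyGetD L k 0 * v)) r (by omega)) ?_
    unfold pvP1
    rw [List.foldl_map]

theorem pv_step_k (a L : List Int)
    (hsub : ∀ (i : Int), 0 ≤ i → i < (L.length : Int) →
      PySem.List.pyGetD a i 0 = PySem.List.pyGetD L i 0)
    (i j : Int) (hi : 0 ≤ i) (hij : i < j) (_hj : j < (L.length : Int)) (r : Int) :
    (PySem.List.pyRange (j + 1) (L.length : Int) 1).foldl (fun result k =>
        (PySem.List.pyRange (k + 1) (L.length : Int) 1).foldl (fun result l =>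
          let current := PySem.List.pyGetD a i 0 * PySem.List.pyGetD a j 0 *
            PySem.List.pyGetD a k 0 * PySem.List.pyGetD a l 0
          if current > result then current else result) result) r
      = List.foldl max r (pvP2 (PySem.List.pyGetD L i 0 * PySem.List.pyGetD L j 0)
          (L.drop (j + 1).toNat)) := by
  refine Eq.trans (PySem.List.foldl_congr_mem _ _
    (fun result k => List.foldl max result
      (pvP1 (PySem.List.pyGetD L i 0 * PySem.List.pyGetD L j 0 * PySem.List.pyGetD L k 0)
        (L.drop (k + 1).toNat))) r ?_) ?_
  · intro acc k hkmem
    rcases PySem.List.mem_pyRange_one.mp hkmem with ⟨hk1, hk2⟩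
    exact pv_step_l a L hsub i j k hi hij (by omega) hk2 acc
  · exact Eq.trans (pv_level L
      (fun x t => pvP1 (PySem.List.pyGetD L i 0 * PySem.List.pyGetD L j 0 * x) t)
      L.length (j + 1) r (by omega) (by omega)) rfl

theorem pv_step_j (a L : List Int)
    (hsub : ∀ (i : Int), 0 ≤ i → i < (L.length : Int) →
      PySem.List.pyGetD a i 0 = PySem.List.pyGetD L i 0)
    (i : Int) (hi : 0 ≤ i) (_hilen : i < (L.length : Int)) (r : Int) :
    (PySem.List.pyRange (i + 1) (L.length : Int) 1).foldl (fun result j =>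
        (PySem.List.pyRange (j + 1) (L.length : Int) 1).foldl (fun result k =>
          (PySem.List.pyRange (k + 1) (L.length : Int) 1).foldl (fun result l =>
            let current := PySem.List.pyGetD a i 0 * PySem.List.pyGetD a j 0 *
              PySem.List.pyGetD a k 0 * PySem.List.pyGetD a l 0
            if current > result then current else result) result) result) r
      = List.foldl max r (pvP3 (PySem.List.pyGetD L i 0) (L.drop (i + 1).toNat)) := by
  refine Eq.trans (PySem.List.foldl_congr_mem _ _
    (fun result j => List.foldl max result
      (pvP2 (PySem.List.pyGetD L i 0 * PySem.List.pyGetD L j 0) (L.drop (j + 1).toNat))) r ?_) ?_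
  · intro acc j hjmem
    rcases PySem.List.mem_pyRange_one.mp hjmem with ⟨hj1, hj2⟩
    exact pv_step_k a L hsub i j hi (by omega) hj2 acc
  · exact Eq.trans (pv_level L
      (fun x t => pvP2 (PySem.List.pyGetD L i 0 * x) t)
      L.length (i + 1) r (by omega) (by omega)) rfl

theorem pvA_eq (n : Int) (a : List Int) (hpre : n ≤ (a.length : Int)) :
    SlowMultiply n a = List.foldl max (-2 * MIN_A ^ 4) (pvP4 (a.take n.toNat)) := by
  unfold SlowMultiply
  by_cases hn : n ≤ 0
  · rw [PySem.List.pyRange_one_eq_nil hn, show n.toNat = 0 from by omega]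
    rfl
  · have hlen : (((a.take n.toNat).length : Nat) : Int) = n := by
      rw [List.length_take]; omega
    have hsub := pv_get_take a n.toNat
    conv_lhs => rw [← hlen]
    refine Eq.trans (PySem.List.foldl_congr_mem _ _
      (fun result i => List.foldl max result
        (pvP3 (PySem.List.pyGetD (a.take n.toNat) i 0) ((a.take n.toNat).drop (i + 1).toNat)))
      (-2 * MIN_A ^ 4) ?_) ?_
    · intro acc i himem
      rcases PySem.List.mem_pyRange_one.mp himem with ⟨hi1, hi2⟩
      exact pv_step_j a (a.take n.toNat) hsub i hi1 hi2 acc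
    · refine Eq.trans (pv_level (a.take n.toNat) pvP3 (a.take n.toNat).length 0
        (-2 * MIN_A ^ 4) (by omega) (by omega)) ?_
      rfl

theorem pvB_eq (n : Int) (a : List Int) (hpre : n ≤ (a.length : Int)) :
    SlowMultiply_alt n a = pvFinish ((pvS 4 ((a.take n.toNat).reverse)).max?) := by
  simp only [SlowMultiply_alt]
  by_cases hn : n ≤ 0
  · rw [PySem.List.pyRange_one_eq_nil hn, show n.toNat = 0 from by omega]
    rfl
  · have hlen : (((a.take n.toNat).length : Nat) : Int) = n := by
      rw [List.length_take]; omega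
    have hsub := pv_get_take a n.toNat
    conv_lhs => rw [← hlen]
    have h1 := PySem.List.foldl_congr_mem (PySem.List.pyRange 0 ((a.take n.toNat).length : Int) 1)
      (fun s i => pvStep s (PySem.List.pyGetD a i 0))
      (fun s i => pvStep s (PySem.List.pyGetD (a.take n.toNat) i 0))
      (⟨none, none, none, none, none, none, none, none⟩ : PVState)
      (by
        intro acc x hx
        rcases PySem.List.mem_pyRange_one.mp hx with ⟨hx1, hx2⟩
        simp only [hsub x hx1 hx2])
    rw [h1, PySem.List.foldl_pyRange_pyGetD' (a.take n.toNat) 0 pvStep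
      (⟨none, none, none, none, none, none, none, none⟩ : PVState) (by omega)]
    have hinit : (⟨none, none, none, none, none, none, none, none⟩ : PVState) = pvStFor [] := by
      decide
    rw [show ((0 : Int).toNat) = 0 from rfl, List.drop_zero, hinit, pv_foldl_step _ [],
      List.append_nil]
    have hproj : (pvStFor ((a.take n.toNat).reverse)).h4
        = (pvS 4 ((a.take n.toNat).reverse)).max? := rfl
    rw [hproj]
    cases hh : (pvS 4 ((a.take n.toNat).reverse)).max? <;> simp [pvFinish]

theorem pv_bridge (L : List Int) :
    List.foldl max (-2 * MIN_A ^ 4) (pvP4 L) = pvFinish ((pvS 4 L.reverse).max?) := by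
  have hmem : ∀ x, x ∈ pvP4 L ↔ x ∈ pvS 4 L.reverse := by
    intro x
    rw [pv_mem_p4]
    unfold pvS
    simp only [List.mem_map]
    constructor
    · rintro ⟨s, hs, rfl⟩
      rcases List.mem_sublistsLen.mp hs with ⟨hsub, hlen⟩
      refine ⟨s.reverse, List.mem_sublistsLen.mpr ⟨List.Sublist.reverse hsub, by simpa⟩,
        List.prod_reverse s⟩
    · rintro ⟨s, hs, rfl⟩
      rcases List.mem_sublistsLen.mp hs with ⟨hsub, hlen⟩
      refine ⟨s.reverse, List.mem_sublistsLen.mpr ⟨?_, by simpa⟩, (List.prod_reverse s).symm⟩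
      have h2 := List.Sublist.reverse hsub
      simpa using h2
  rw [pv_foldl_max_eq, pv_max?_congr_mem _ _ hmem]
  cases hh : (pvS 4 L.reverse).max? <;> simp [pvFinish, pv_if_max]

-- ===== VERDICT (by name: the statement is the Claim_ definition above) =====
theorem SlowMultiply_spec : Claim_equal_SlowMultiply := by
  intro n a _ hpre
  unfold Spec_SlowMultiply
  rw [pvA_eq n a hpre, pvB_eq n a hpre, pv_bridge]
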